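-- pv_equiv track=rewrite | github.com/Anuj-negi2207/Codeforces-Competition-Questions- | A_1_Gardener_and_the_Capybaras_easy_version.py | hash_it
-- ===== SOURCE A (Python) =====
-- from collections import defaultdict as ddc
--
-- def hash_it(arr, size, mod = (10**9 + 7)):
--     """
--     mul -> must be greater than max(arr)
--     rest can be modified
--     """
--     if not size: return
--     mul, hashh, div = 256, 0, (1<<(8*size-8))%mod
--
--     C = ddc(list)
--     for i in range(size):
--         hashh = (mul * hashh + arr[i])%mod
--
--     C[hashh].append(0)
--
--     for i in range(len(arr)-size):
--         #update the hashh
--         hashh = (mul*(hashh-arr[i]*div) + arr[i+size])%mod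
--         C[hashh].append(i+1)
--
--     return C
-- ===== SOURCE B (Python) =====
-- from collections import defaultdict as ddc
--
-- def hash_it(arr, size, mod=(10**9 + 7)):
--     if not size:
--         return
--     w = [pow(256, size - 1 - j, mod) for j in range(size)]
--     def window_hash(s):
--         return sum(arr[s + j] * w[j] for j in range(size)) % mod
--     C = ddc(list)
--     C[window_hash(0)].append(0)
--     for s in range(1, len(arr) - size + 1):
--         C[window_hash(s)].append(s)
--     return C
-- ===== Notes on version B (the rewrite author's own statement) =====
-- stated objective: alternative
-- what changed: Replaces A's two-stage rolling hash (a Horner loop for the first window, then an O(1) subtract-shift-add update per later window) by stateless per-window recomputation: a precomputed modular weight table pow(256,size-1-j,mod) and a window_hash helper that takes each window's dot product with it from scratch.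
import Mathlib
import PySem

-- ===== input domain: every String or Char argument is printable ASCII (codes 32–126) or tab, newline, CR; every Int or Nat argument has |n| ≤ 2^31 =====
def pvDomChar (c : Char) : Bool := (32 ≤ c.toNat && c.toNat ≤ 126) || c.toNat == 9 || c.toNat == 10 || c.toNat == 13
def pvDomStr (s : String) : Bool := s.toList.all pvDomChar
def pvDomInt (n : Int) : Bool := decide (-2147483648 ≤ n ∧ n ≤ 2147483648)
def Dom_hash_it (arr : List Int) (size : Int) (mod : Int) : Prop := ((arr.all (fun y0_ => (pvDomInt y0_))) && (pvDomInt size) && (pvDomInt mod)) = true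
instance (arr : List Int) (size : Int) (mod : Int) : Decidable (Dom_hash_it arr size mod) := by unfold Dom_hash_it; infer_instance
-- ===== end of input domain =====

-- B replaces A's rolling-hash update by stateless per-window recomputation: each window's hash is
-- the dot product of its elements with a precomputed modular weight table; alternative decomposition, not faster.


-- ===== PORT A =====
-- literal transliteration of A; '1<<(8*size-8)' is 2^(8*size-8) (exact for 8*size-8 ≥ 0, i.e. on Pre_;
-- Python raises ValueError for a negative shift, excluded by Pre_); arr[i] is pyGetD (always in
-- range on Pre_); '%' is PySem.Int.mod (Python floor mod); the defaultdict append is Dict.modify.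
def hash_it (arr : List Int) (size : Int) (mod : Int) : Option (List (Int × List Int)) :=
  if size = 0 then none
  else
    let mul : Int := 256
    let div : Int := PySem.Int.mod ((2 : Int) ^ (8 * size - 8).toNat) mod
    let hashh : Int := (PySem.List.pyRange 0 size 1).foldl
      (fun hashh i => PySem.Int.mod (mul * hashh + PySem.List.pyGetD arr i 0) mod) 0
    let C : PySem.Dict Int (List Int) := PySem.Dict.empty.modify hashh [] (· ++ [0])
    let st := (PySem.List.pyRange 0 ((arr.length : Int) - size) 1).foldl
      (fun (st : Int × PySem.Dict Int (List Int)) i =>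
        let h := PySem.Int.mod
          (mul * (st.1 - PySem.List.pyGetD arr i 0 * div) + PySem.List.pyGetD arr (i + size) 0) mod
        (h, st.2.modify h [] (· ++ [i + 1]))) (hashh, C)
    some st.2.items

-- ===== PORT B =====
-- transliteration of Source B: pow(256, e, mod) is PySem.Int.powMod; the window_hash closure is the
-- helper windowHash (its captured arr/w/size/mod passed explicitly); arr[s+j]/w[j] are pyGetD
-- (always in range on Pre_); 'sum(...)' is the foldl accumulating the generator's terms.
def windowHash (arr : List Int) (w : List Int) (size : Int) (mod : Int) (s : Int) : Int :=
  PySem.Int.mod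
    ((PySem.List.pyRange 0 size 1).foldl
      (fun acc j => acc + PySem.List.pyGetD arr (s + j) 0 * PySem.List.pyGetD w j 0) 0) mod

def hash_it_alt (arr : List Int) (size : Int) (mod : Int) : Option (List (Int × List Int)) :=
  if size = 0 then none
  else
    let w : List Int := (PySem.List.pyRange 0 size 1).map
      (fun j => PySem.Int.powMod 256 (size - 1 - j).toNat mod)
    let C : PySem.Dict Int (List Int) :=
      PySem.Dict.empty.modify (windowHash arr w size mod 0) [] (· ++ [0])
    let C := (PySem.List.pyRange 1 ((arr.length : Int) - size + 1) 1).foldl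
      (fun (C : PySem.Dict Int (List Int)) s =>
        C.modify (windowHash arr w size mod s) [] (· ++ [s])) C
    some C.items

-- ===== PRECONDITION & SPEC =====
-- Python A raises outside Pre_: ValueError for size < 0 (negative shift), IndexError for
-- 0 < size with len(arr) < size, ZeroDivisionError for mod = 0 (size = 0 returns None first).
def Pre_hash_it (arr : List Int) (size : Int) (mod : Int) : Prop :=
  size = 0 ∨ (0 < size ∧ size ≤ (arr.length : Int) ∧ mod ≠ 0)
instance (arr : List Int) (size : Int) (mod : Int) : Decidable (Pre_hash_it arr size mod) := by
  unfold Pre_hash_it; infer_instance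
def pvWitness_hash_it : List Int × Int × Int := ([1, 2, 3], 2, 7)

def Spec_hash_it (arr : List Int) (size : Int) (mod : Int) (out : Option (List (Int × List Int))) : Prop := out = hash_it_alt arr size mod
instance (arr : List Int) (size : Int) (mod : Int) (out : Option (List (Int × List Int))) : Decidable (Spec_hash_it arr size mod out) := by unfold Spec_hash_it; infer_instance

-- ===== CLAIM (what is proved, stated in full; the proofs are below) =====
def Claim_equal_hash_it : Prop := ∀ (arr : List Int) (size : Int) (mod : Int), Dom_hash_it arr size mod → Pre_hash_it arr size mod → Spec_hash_it arr size mod (hash_it arr size mod)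

-- ===== LEMMAS AND PROOFS =====
def pvA (arr : List Int) (k : Nat) : Int := arr.getD k 0

theorem pvA_def (arr : List Int) (k : Nat) : arr.getD k 0 = pvA arr k := rfl

def pvV (arr : List Int) (s : Nat) : Nat → Int
  | 0 => 0
  | l + 1 => 256 * pvV arr s l + pvA arr (s + l)

def pvK (arr : List Int) (n : Nat) (m : Int) (s : Nat) : Int := Int.fmod (pvV arr s n) m

def pvD (arr : List Int) (n : Nat) (m : Int) (t : Nat) : PySem.Dict Int (List Int) :=
  (List.range (t + 1)).foldl
    (fun d s => d.modify (pvK arr n m s) [] (· ++ [(s : Int)])) PySem.Dict.empty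

theorem pv_fmod_congr (m a b : Int) (h : m ∣ (a - b)) : a.fmod m = b.fmod m := by
  obtain ⟨t, ht⟩ := h
  have : a = b + m * t := by linarith
  rw [this, Int.add_mul_fmod_self_left]

theorem pv_dvd_fmod_sub (m a : Int) : m ∣ (a.fmod m - a) := by
  have := Int.fmod_add_mul_fdiv a m
  exact ⟨-(a.fdiv m), by linarith⟩

theorem pv_sum_sub (l : List Nat) (f g : Nat → Int) :
    (l.map f).sum - (l.map g).sum = (l.map (fun x => f x - g x)).sum := by
  induction l with
  | nil => simp
  | cons x l ih => simp; linarith [ih]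

theorem pvA_first_aux (arr : List Int) (m : Int) (n : Nat) :
    (List.range n).foldl (fun h k => Int.fmod (256 * h + pvA arr k) m) 0
      = Int.fmod (pvV arr 0 n) m := by
  induction n with
  | zero => simp [pvV, Int.zero_fmod]
  | succ n ih =>
      rw [List.range_succ, List.foldl_append, ih]
      simp only [List.foldl]
      apply pv_fmod_congr
      have h1 := pv_dvd_fmod_sub m (pvV arr 0 n)
      have h2 : (256 * Int.fmod (pvV arr 0 n) m + pvA arr n) - pvV arr 0 (n + 1)
          = 256 * (Int.fmod (pvV arr 0 n) m - pvV arr 0 n) := by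
        simp [pvV]; ring
      rw [h2]
      exact Dvd.dvd.mul_left h1 256

theorem pvV_front (arr : List Int) (s l : Nat) :
    pvV arr s (l + 1) = pvA arr s * 256 ^ l + pvV arr (s + 1) l := by
  induction l generalizing s with
  | zero => simp [pvV]
  | succ l ih =>
      have h1 : pvV arr s (l + 1 + 1) = 256 * pvV arr s (l + 1) + pvA arr (s + (l + 1)) := rfl
      rw [h1, ih]
      have h2 : pvV arr (s + 1) (l + 1) = 256 * pvV arr (s + 1) l + pvA arr (s + 1 + l) := rfl
      rw [h2]
      have h3 : s + (l + 1) = s + 1 + l := by omega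
      rw [h3]; ring

theorem pv_roll (arr : List Int) (s n : Nat) (hn : 0 < n) :
    256 * (pvV arr s n - pvA arr s * 256 ^ (n - 1)) + pvA arr (s + n) = pvV arr (s + 1) n := by
  obtain ⟨l, rfl⟩ : ∃ l, n = l + 1 := ⟨n - 1, by omega⟩
  rw [pvV_front]
  have h2 : pvV arr (s + 1) (l + 1) = 256 * pvV arr (s + 1) l + pvA arr (s + 1 + l) := rfl
  rw [h2]
  have h3 : s + (l + 1) = s + 1 + l := by omega
  rw [h3]
  simp only [Nat.add_sub_cancel]
  ring

theorem pv_sumV (arr : List Int) (s n : Nat) :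
    ((List.range n).map (fun k => pvA arr (s + k) * 256 ^ (n - 1 - k))).sum = pvV arr s n := by
  induction n generalizing s with
  | zero => simp [pvV]
  | succ n ih =>
      rw [List.range_succ, List.map_append, List.sum_append]
      have hcong : (List.range n).map (fun k => pvA arr (s + k) * 256 ^ (n + 1 - 1 - k))
          = (List.range n).map (fun k => 256 * (pvA arr (s + k) * 256 ^ (n - 1 - k))) := by
        apply List.map_congr_left
        intro k hk
        have hk' : k < n := List.mem_range.mp hk
        have h4 : n + 1 - 1 - k = (n - 1 - k) + 1 := by omega
        rw [h4, pow_succ]; ring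
      rw [hcong, List.sum_map_mul_left, ih]
      simp [pvV]

theorem pv_sumK (arr : List Int) (m : Int) (s n : Nat) :
    Int.fmod (((List.range n).map
        (fun k => pvA arr (s + k) * Int.fmod ((256 : Int) ^ (n - 1 - k)) m)).sum) m
      = pvK arr n m s := by
  unfold pvK
  apply pv_fmod_congr
  rw [← pv_sumV arr s n, pv_sum_sub]
  apply List.dvd_sum
  intro x hx
  simp only [List.mem_map] at hx
  obtain ⟨k, _, rfl⟩ := hx
  have h5 : pvA arr (s + k) * Int.fmod ((256:Int) ^ (n - 1 - k)) m - pvA arr (s + k) * (256:Int) ^ (n - 1 - k)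
      = pvA arr (s + k) * (Int.fmod ((256:Int) ^ (n - 1 - k)) m - (256:Int) ^ (n - 1 - k)) := by ring
  rw [h5]
  exact Dvd.dvd.mul_left (pv_dvd_fmod_sub m _) _

theorem pvD_succ (arr : List Int) (n : Nat) (m : Int) (t : Nat) :
    pvD arr n m (t + 1)
      = (pvD arr n m t).modify (pvK arr n m (t + 1)) [] (· ++ [((t : Int) + 1)]) := by
  unfold pvD
  rw [List.range_succ, List.foldl_append]
  simp only [List.foldl]
  norm_num

theorem pvA_loop (arr : List Int) (n : Nat) (m : Int) (hn : 0 < n) (t : Nat) :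
    (List.range t).foldl
      (fun (st : Int × PySem.Dict Int (List Int)) (k : Nat) =>
        (Int.fmod (256 * (st.1 - pvA arr k * Int.fmod ((256 : Int) ^ (n - 1)) m) + pvA arr (k + n)) m,
          st.2.modify
            (Int.fmod (256 * (st.1 - pvA arr k * Int.fmod ((256 : Int) ^ (n - 1)) m) + pvA arr (k + n)) m)
            [] (· ++ [(k : Int) + 1])))
      (pvK arr n m 0, pvD arr n m 0)
    = (pvK arr n m t, pvD arr n m t) := by
  induction t with
  | zero => rfl
  | succ t ih =>
      rw [List.range_succ, List.foldl_append, ih]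
      simp only [List.foldl]
      have hkey : Int.fmod
          (256 * (pvK arr n m t - pvA arr t * Int.fmod ((256 : Int) ^ (n - 1)) m) + pvA arr (t + n)) m
          = pvK arr n m (t + 1) := by
        unfold pvK
        apply pv_fmod_congr
        rw [← pv_roll arr t n hn]
        have hd : (256 * (Int.fmod (pvV arr t n) m - pvA arr t * Int.fmod ((256 : Int) ^ (n - 1)) m) + pvA arr (t + n))
            - (256 * (pvV arr t n - pvA arr t * (256 : Int) ^ (n - 1)) + pvA arr (t + n))
            = 256 * ((Int.fmod (pvV arr t n) m - pvV arr t n)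
                - pvA arr t * (Int.fmod ((256 : Int) ^ (n - 1)) m - (256 : Int) ^ (n - 1))) := by ring
        rw [hd]
        exact Dvd.dvd.mul_left (dvd_sub (pv_dvd_fmod_sub m _) (Dvd.dvd.mul_left (pv_dvd_fmod_sub m _) _)) 256
      rw [hkey, pvD_succ]

theorem pvA_first (arr : List Int) (m : Int) (n : Nat) :
    (List.range n).foldl (fun h k => Int.fmod (256 * h + pvA arr k) m) 0
      = pvK arr n m 0 := pvA_first_aux arr m n

theorem pvD_zero (arr : List Int) (n : Nat) (m : Int) :
    PySem.Dict.empty.modify (pvK arr n m 0) [] (· ++ [(0 : Int)]) = pvD arr n m 0 := rfl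

theorem pvWH (arr : List Int) (n : Nat) (m : Int) (w : List Int)
    (hw : ∀ k : Nat, k < n → pvA w k = Int.fmod ((256 : Int) ^ (n - 1 - k)) m) (s : Nat) :
    windowHash arr w (n : Int) m ((s : Nat) : Int) = pvK arr n m s := by
  unfold windowHash
  simp only [PySem.Int.mod, PySem.List.pyRange_zero_natCast, List.foldl_map,
    PySem.List.pyGetD_natCast, ← Nat.cast_add, pvA_def]
  rw [PySem.List.foldl_congr_mem (List.range n) _
    (fun acc k => acc + pvA arr (s + k) * Int.fmod ((256 : Int) ^ (n - 1 - k)) m) 0 ?_]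
  · rw [PySem.List.foldl_add, zero_add]
    exact pv_sumK arr m s n
  · intro acc x hx
    rw [hw x (List.mem_range.mp hx)]

theorem pv_one_add (k : Nat) : (1 : Int) + (k : Int) = ((k + 1 : Nat) : Int) := by
  push_cast; ring

theorem pvB_loop (arr : List Int) (n : Nat) (m : Int) (w : List Int)
    (hw : ∀ k : Nat, k < n → pvA w k = Int.fmod ((256 : Int) ^ (n - 1 - k)) m) (t : Nat) :
    (List.range t).foldl
      (fun (d : PySem.Dict Int (List Int)) (k : Nat) =>
        d.modify (windowHash arr w (n : Int) m (((k + 1 : Nat)) : Int)) []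
          (· ++ [((k + 1 : Nat) : Int)])) (pvD arr n m 0)
    = pvD arr n m t := by
  induction t with
  | zero => rfl
  | succ t ih =>
      rw [List.range_succ, List.foldl_append, ih]
      simp only [List.foldl]
      rw [pvWH arr n m w hw (t + 1), pvD_succ]
      norm_num

theorem main_eq (arr : List Int) (size : Int) (mod : Int)
    (hpos : 0 < size) (hle : size ≤ (arr.length : Int)) :
    hash_it arr size mod = hash_it_alt arr size mod := by
  obtain ⟨n, rfl⟩ : ∃ n : Nat, size = (n : Int) := ⟨size.toNat, (Int.toNat_of_nonneg (le_of_lt hpos)).symm⟩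
  have hn : 0 < n := by exact_mod_cast hpos
  have hnl : n ≤ arr.length := by exact_mod_cast hle
  have hsz : (n : Int) ≠ 0 := by exact_mod_cast hn.ne'
  have hL : (arr.length : Int) - (n : Int) = ((arr.length - n : Nat) : Int) := by
    push_cast [Nat.cast_sub hnl]; ring
  have hL2 : ((arr.length - n : Nat) : Int) + 1 = ((arr.length - n + 1 : Nat) : Int) := by
    push_cast; ring
  have hdiv : ((2 : Int) ^ (8 * (n : Int) - 8).toNat) = (256 : Int) ^ (n - 1) := by
    have h1 : (8 * (n:Int) - 8).toNat = 8 * (n - 1) := by omega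
    rw [h1, pow_mul]; norm_num
  have hw : ∀ k : Nat, k < n →
      pvA ((List.range n).map ((fun j => Int.fmod ((256:Int) ^ ((n:Int) - 1 - j).toNat) mod) ∘ fun k : Nat => (k : Int))) k
        = Int.fmod ((256 : Int) ^ (n - 1 - k)) mod := by
    intro k hk
    have hlen2 : k < ((List.range n).map ((fun j => Int.fmod ((256:Int) ^ ((n:Int) - 1 - j).toNat) mod) ∘ fun k : Nat => (k : Int))).length := by
      simp [hk]
    rw [pvA, List.getD_eq_getElem _ _ hlen2, List.getElem_map, List.getElem_range]
    have he : ((n : Int) - 1 - (k : Int)).toNat = n - 1 - k := by omega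
    simp only [Function.comp, he]
  have hRange : PySem.List.pyRange 1 ((arr.length - n + 1 : Nat) : Int) 1
      = (List.range (arr.length - n)).map (fun k : Nat => (1 : Int) + (k : Int)) := by
    rw [PySem.List.pyRange_one]
    have h2 : (((arr.length - n + 1 : Nat) : Int) - 1).toNat = arr.length - n := by omega
    rw [h2]
  have hWH0 : windowHash arr ((List.range n).map ((fun j => Int.fmod ((256:Int) ^ ((n:Int) - 1 - j).toNat) mod) ∘ fun k : Nat => (k : Int))) (n : Int) mod 0 = pvK arr n mod 0 := by
    have h := pvWH arr n mod _ hw 0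
    simpa using h
  simp only [hash_it, hash_it_alt, if_neg hsz, hL, hL2, hdiv, hRange,
    PySem.List.pyRange_zero_natCast, List.foldl_map, List.map_map,
    PySem.Int.mod, PySem.Int.powMod, pv_one_add,
    PySem.List.pyGetD_natCast, ← Nat.cast_add, pvA_def]
  rw [pvA_first arr mod n, hWH0, pvD_zero arr n mod,
    pvA_loop arr n mod hn (arr.length - n),
    pvB_loop arr n mod _ hw (arr.length - n)]

-- ===== VERDICT (by name: the statement is the Claim_ definition above) =====
theorem hash_it_spec : Claim_equal_hash_it := by
  intro arr size mod _hdom hpre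
  unfold Spec_hash_it
  rcases hpre with h0 | ⟨h1, h2, h3⟩
  · subst h0; rfl
  · exact main_eq arr size mod h1 h2
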